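-- pv_equiv track=rewrite | github.com/zpybt6jjnf-ship-it/daily-digest | build_digest.py | parse_grantees
-- ===== SOURCE A (Python) =====
-- def parse_grantees(content):
--     """Parse grantee section."""
--     orgs = []
--     no_pubs = []
--     current_org = None
--
--     for line in content.split('\n'):
--         line = line.rstrip()
--
--         if line.startswith('ORG:'):
--             if current_org:
--                 orgs.append(current_org)
--             current_org = {'name': line.replace('ORG:', '').strip(), 'title': '', 'date': '', 'summary': '', 'url': ''}
--
--         elif line.startswith('NO_PUBLICATIONS:'):
--             no_pubs_str = line.replace('NO_PUBLICATIONS:', '').strip()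
--             no_pubs = [o.strip() for o in no_pubs_str.split(',') if o.strip()]
--
--         elif current_org is not None:
--             if line.startswith('title:'):
--                 current_org['title'] = line.replace('title:', '').strip()
--             elif line.startswith('date:'):
--                 current_org['date'] = line.replace('date:', '').strip()
--             elif line.startswith('summary:'):
--                 current_org['summary'] = line.replace('summary:', '').strip()
--             elif line.startswith('url:'):
--                 current_org['url'] = line.replace('url:', '').strip()
--
--     if current_org:
--         orgs.append(current_org)
--
--     return orgs, no_pubs
-- ===== SOURCE B (Python) =====
-- FIELD_KEYS = ('title', 'date', 'summary', 'url')
--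
--
-- def _parse_no_pubs(line):
--     s = line.replace('NO_PUBLICATIONS:', '').strip()
--     return [o.strip() for o in s.split(',') if o.strip()]
--
--
-- def _build_org(rec):
--     org = {'name': rec[0].replace('ORG:', '').strip(),
--            'title': '', 'date': '', 'summary': '', 'url': ''}
--     for line in rec[1:]:
--         if line.startswith('NO_PUBLICATIONS:'):
--             continue
--         for key in FIELD_KEYS:
--             prefix = key + ':'
--             if line.startswith(prefix):
--                 org[key] = line.replace(prefix, '').strip()
--                 break
--     return org
--
--
-- def parse_grantees(content):
--     """Parse grantee section."""
--     lines = [ln.rstrip() for ln in content.split('\n')]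
--
--     no_pubs = []
--     for ln in lines:
--         if ln.startswith('NO_PUBLICATIONS:'):
--             no_pubs = _parse_no_pubs(ln)
--
--     records = []
--     current = None
--     for ln in lines:
--         if ln.startswith('ORG:'):
--             current = [ln]
--             records.append(current)
--         elif current is not None:
--             current.append(ln)
--
--     return [_build_org(rec) for rec in records], no_pubs
-- ===== Notes on version B (the rewrite author's own statement) =====
-- stated objective: alternative
-- what changed: A is one stateful pass mutating a current-org dict and the no_pubs list as it goes; B is three separate passes: a global scan taking the last NO_PUBLICATIONS line, a grouping pass that splits the lines into ORG-headed records (dropping the preamble), and a per-record pass that builds each dict from its stored lines.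
import Mathlib
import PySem

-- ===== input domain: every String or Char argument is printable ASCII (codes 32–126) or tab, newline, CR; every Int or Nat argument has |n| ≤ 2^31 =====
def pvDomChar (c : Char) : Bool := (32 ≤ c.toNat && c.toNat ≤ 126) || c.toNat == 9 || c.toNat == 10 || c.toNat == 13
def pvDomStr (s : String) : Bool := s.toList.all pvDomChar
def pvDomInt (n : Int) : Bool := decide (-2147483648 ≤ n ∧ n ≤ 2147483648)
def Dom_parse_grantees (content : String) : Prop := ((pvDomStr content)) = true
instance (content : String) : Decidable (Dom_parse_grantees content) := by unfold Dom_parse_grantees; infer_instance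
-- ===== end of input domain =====

-- B replaces A's single stateful pass by three passes (last NO_PUBLICATIONS line,
-- grouping into ORG-headed records, per-record dict build); same O(n) cost, alternative decomposition.

-- ===== PORT A =====
-- shared helpers: both Pythons contain the identical expressions for s.split(sep)
-- (sep here is always a nonempty literal, so split? is always `some`), for the
-- NO_PUBLICATIONS parse and for the fresh org dict of an ORG: line
def pvSplit (s sep : String) : List String := (PySem.Str.split? s sep).getD []

def pvParseNoPubs (line : String) : List String :=
  (pvSplit (PySem.Str.strip (PySem.Str.replace line "NO_PUBLICATIONS:" "")) ",").filterMap
    (fun o => let t := PySem.Str.strip o; if t = "" then none else some t)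

def pvInitOrg (line : String) : PySem.Dict String String :=
  ((((PySem.Dict.empty.insert "name"
      (PySem.Str.strip (PySem.Str.replace line "ORG:" ""))).insert "title" "").insert "date" "").insert
      "summary" "").insert "url" ""

-- the body of A's loop on the already-rstripped line
def pvStepACore (st : List (PySem.Dict String String) × List String × Option (PySem.Dict String String))
    (line : String) :
    List (PySem.Dict String String) × List String × Option (PySem.Dict String String) :=
  if PySem.Str.startswith line "ORG:" then
    ((match st.2.2 with
      | some d => if d.items = [] then st.1 else st.1 ++ [d]   -- `if current_org:` truthiness
      | none => st.1),
     st.2.1, some (pvInitOrg line))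
  else if PySem.Str.startswith line "NO_PUBLICATIONS:" then
    (st.1, pvParseNoPubs line, st.2.2)
  else
    match st.2.2 with
    | none => st
    | some d =>
        (st.1, st.2.1,
         some (if PySem.Str.startswith line "title:" then
                 d.insert "title" (PySem.Str.strip (PySem.Str.replace line "title:" ""))
               else if PySem.Str.startswith line "date:" then
                 d.insert "date" (PySem.Str.strip (PySem.Str.replace line "date:" ""))
               else if PySem.Str.startswith line "summary:" then
                 d.insert "summary" (PySem.Str.strip (PySem.Str.replace line "summary:" ""))
               else if PySem.Str.startswith line "url:" then
                 d.insert "url" (PySem.Str.strip (PySem.Str.replace line "url:" ""))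
               else d))

def pvStepA (st : List (PySem.Dict String String) × List String × Option (PySem.Dict String String))
    (raw : String) :
    List (PySem.Dict String String) × List String × Option (PySem.Dict String String) :=
  pvStepACore st (PySem.Str.rstrip raw)   -- line = line.rstrip()

def parse_grantees (content : String) : (List (List (String × String))) × List String :=
  let st := (pvSplit content "\n").foldl pvStepA ([], [], none)
  let orgs :=
    match st.2.2 with
    | some d => if d.items = [] then st.1 else st.1 ++ [d]   -- final `if current_org:` flush
    | none => st.1
  (orgs.map (·.items), st.2.1)

-- ===== PORT B =====
def pvFieldKeys : List String := ["title", "date", "summary", "url"]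

-- Source B's inner `for key in FIELD_KEYS: … break` loop
def pvTryKeys : List String → PySem.Dict String String → String → PySem.Dict String String
  | [], org, _ => org
  | k :: ks, org, line =>
      let pre := k ++ ":"
      if PySem.Str.startswith line pre then
        org.insert k (PySem.Str.strip (PySem.Str.replace line pre ""))
      else pvTryKeys ks org line

def pvBuildOrg (rec : List String) : PySem.Dict String String :=
  match rec with
  | [] => PySem.Dict.empty   -- unreachable: every record starts with its ORG: line
  | h :: t =>
      t.foldl (fun org line =>
        if PySem.Str.startswith line "NO_PUBLICATIONS:" then org
        else pvTryKeys pvFieldKeys org line) (pvInitOrg h)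

def pvGroupStep (st : List (List String) × Option (List String)) (line : String) :
    List (List String) × Option (List String) :=
  if PySem.Str.startswith line "ORG:" then
    ((match st.2 with | some c => st.1 ++ [c] | none => st.1), some [line])
  else
    match st.2 with
    | some c => (st.1, some (c ++ [line]))
    | none => st

def pvNPStep (acc : List String) (line : String) : List String :=
  if PySem.Str.startswith line "NO_PUBLICATIONS:" then pvParseNoPubs line else acc

def parse_grantees_alt (content : String) : (List (List (String × String))) × List String :=
  let lines := (pvSplit content "\n").map PySem.Str.rstrip
  let no_pubs := lines.foldl pvNPStep []
  let g := lines.foldl pvGroupStep ([], none)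
  let records := g.1 ++ g.2.toList
  ((records.map pvBuildOrg).map (·.items), no_pubs)

-- ===== PRECONDITION & SPEC =====
def Spec_parse_grantees (content : String) (out : (List (List (String × String))) × List String) : Prop := out = parse_grantees_alt content
instance (content : String) (out : (List (List (String × String))) × List String) : Decidable (Spec_parse_grantees content out) := by unfold Spec_parse_grantees; infer_instance

-- ===== CLAIM (what is proved, stated in full; the proofs are below) =====
def Claim_equal_parse_grantees : Prop := ∀ (content : String), Dom_parse_grantees content → Spec_parse_grantees content (parse_grantees content)

-- ===== LEMMAS AND PROOFS =====

-- a line cannot start with both "ORG:" and "NO_PUBLICATIONS:"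
lemma pv_not_both (line : String) (h : PySem.Str.startswith line "ORG:" = true) :
    PySem.Str.startswith line "NO_PUBLICATIONS:" = false := by
  by_contra hn
  rw [Bool.not_eq_false] at hn
  rw [PySem.Str.startswith_eq, PySem.Chars.startswith_iff] at h hn
  rcases h with ⟨t1, h1⟩
  rcases hn with ⟨t2, h2⟩
  rw [← h1] at h2
  have e1 : "NO_PUBLICATIONS:".toList = 'N' :: "O_PUBLICATIONS:".toList := by decide
  have e2 : "ORG:".toList = 'O' :: "RG:".toList := by decide
  rw [e1, e2] at h2
  simp only [List.cons_append] at h2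
  exact absurd (List.cons.inj h2).1 (by decide)

lemma pv_initOrg_contains_name (h : String) : (pvInitOrg h).contains "name" = true := by
  simp [pvInitOrg, PySem.Dict.contains_insert, PySem.Dict.contains_insert_self]

lemma pv_contains_name_insert (d : PySem.Dict String String) (k v : String)
    (hd : d.contains "name" = true) : (d.insert k v).contains "name" = true := by
  simp [PySem.Dict.contains_insert, hd]

lemma pv_contains_name_tryKeys (ks : List String) (d : PySem.Dict String String) (line : String)
    (hd : d.contains "name" = true) : (pvTryKeys ks d line).contains "name" = true := by
  induction ks generalizing d with
  | nil => simpa [pvTryKeys]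
  | cons k ks ih =>
      simp only [pvTryKeys]
      split
      · exact pv_contains_name_insert _ _ _ hd
      · exact ih _ hd

lemma pv_contains_name_fold (t : List String) (d : PySem.Dict String String)
    (hd : d.contains "name" = true) :
    ((t.foldl (fun org line =>
        if PySem.Str.startswith line "NO_PUBLICATIONS:" then org
        else pvTryKeys pvFieldKeys org line) d).contains "name") = true := by
  induction t generalizing d with
  | nil => simpa
  | cons x xs ih =>
      simp only [List.foldl_cons]
      apply ih
      split
      · exact hd
      · exact pv_contains_name_tryKeys _ _ _ hd

lemma pv_buildOrg_items_ne_nil (h : String) (t : List String) :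
    (pvBuildOrg (h :: t)).items ≠ [] := by
  have hc : (pvBuildOrg (h :: t)).contains "name" = true := by
    simp only [pvBuildOrg]
    exact pv_contains_name_fold t _ (pv_initOrg_contains_name h)
  intro he
  rcases hd : pvBuildOrg (h :: t) with ⟨items⟩
  rw [hd] at hc he
  subst he
  simp [PySem.Dict.contains] at hc

-- A's field-update chain is Source B's key loop
lemma pv_chain_eq_tryKeys (d : PySem.Dict String String) (line : String) :
    (if PySem.Str.startswith line "title:" then
       d.insert "title" (PySem.Str.strip (PySem.Str.replace line "title:" ""))
     else if PySem.Str.startswith line "date:" then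
       d.insert "date" (PySem.Str.strip (PySem.Str.replace line "date:" ""))
     else if PySem.Str.startswith line "summary:" then
       d.insert "summary" (PySem.Str.strip (PySem.Str.replace line "summary:" ""))
     else if PySem.Str.startswith line "url:" then
       d.insert "url" (PySem.Str.strip (PySem.Str.replace line "url:" ""))
     else d) = pvTryKeys pvFieldKeys d line := by
  simp only [pvTryKeys, pvFieldKeys]
  rfl

-- adding a non-ORG record line = one step of Source B's per-record build
lemma pv_buildOrg_snoc (h : String) (t : List String) (line : String) :
    pvBuildOrg ((h :: t) ++ [line]) =
      (if PySem.Str.startswith line "NO_PUBLICATIONS:" then pvBuildOrg (h :: t)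
       else pvTryKeys pvFieldKeys (pvBuildOrg (h :: t)) line) := by
  simp only [pvBuildOrg, List.cons_append, List.foldl_append, List.foldl_cons, List.foldl_nil]

-- the loop invariant: A's fold state is B's grouping fold state, record-built
lemma pv_main (ls : List String) : ∀ (recs : List (List String)) (cur : Option (List String))
    (np : List String), (∀ c ∈ cur, c ≠ []) →
    ls.foldl pvStepACore (recs.map pvBuildOrg, np, cur.map pvBuildOrg) =
      (((ls.foldl pvGroupStep (recs, cur)).1).map pvBuildOrg,
       ls.foldl pvNPStep np,
       ((ls.foldl pvGroupStep (recs, cur)).2).map pvBuildOrg) := by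
  induction ls with
  | nil => intro recs cur np _; rfl
  | cons line ls ih =>
      intro recs cur np hcur
      simp only [List.foldl_cons]
      cases hORG : PySem.Str.startswith line "ORG:" with
      | true =>
          have hNP := pv_not_both line hORG
          have hN : pvNPStep np line = np := by unfold pvNPStep; rw [hNP]; rfl
          cases cur with
          | none =>
              have hA : pvStepACore (recs.map pvBuildOrg, np, Option.map pvBuildOrg none) line =
                  (recs.map pvBuildOrg, np, Option.map pvBuildOrg (some [line])) := by
                unfold pvStepACore; rw [hORG]; rfl
              have hG : pvGroupStep (recs, none) line = (recs, some [line]) := by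
                unfold pvGroupStep; rw [hORG]; rfl
              rw [hA, hG, hN, ih _ _ _ (by intro c hc; simp at hc; subst hc; simp)]
          | some c =>
              obtain ⟨h0, t0, rfl⟩ : ∃ h0 t0, c = h0 :: t0 := by
                cases c with
                | nil => exact absurd rfl (hcur _ rfl)
                | cons a b => exact ⟨a, b, rfl⟩
              have hA : pvStepACore (recs.map pvBuildOrg, np,
                    Option.map pvBuildOrg (some (h0 :: t0))) line =
                  ((recs ++ [h0 :: t0]).map pvBuildOrg, np,
                   Option.map pvBuildOrg (some [line])) := by
                simp only [pvStepACore, Option.map_some, hORG, eq_self_iff_true, if_true,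
                  List.map_append, List.map_cons, List.map_nil, pvBuildOrg, List.foldl_nil]
                rw [if_neg (by simpa [pvBuildOrg] using pv_buildOrg_items_ne_nil h0 t0)]
              have hG : pvGroupStep (recs, some (h0 :: t0)) line =
                  (recs ++ [h0 :: t0], some [line]) := by
                unfold pvGroupStep; rw [hORG]; rfl
              rw [hA, hG, hN, ih _ _ _ (by intro c hc; simp at hc; subst hc; simp)]
      | false =>
          cases hNP : PySem.Str.startswith line "NO_PUBLICATIONS:" with
          | true =>
              have hN : pvNPStep np line = pvParseNoPubs line := by
                unfold pvNPStep; rw [hNP]; rfl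
              cases cur with
              | none =>
                  have hA : pvStepACore (recs.map pvBuildOrg, np, Option.map pvBuildOrg none) line =
                      (recs.map pvBuildOrg, pvParseNoPubs line, Option.map pvBuildOrg none) := by
                    unfold pvStepACore; rw [hORG, hNP]; rfl
                  have hG : pvGroupStep (recs, none) line = (recs, none) := by
                    unfold pvGroupStep; rw [hORG]; rfl
                  rw [hA, hG, hN, ih _ _ _ (by intro c hc; simp at hc)]
              | some c =>
                  obtain ⟨h0, t0, rfl⟩ : ∃ h0 t0, c = h0 :: t0 := by
                    cases c with
                    | nil => exact absurd rfl (hcur _ rfl)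
                    | cons a b => exact ⟨a, b, rfl⟩
                  have hA : pvStepACore (recs.map pvBuildOrg, np,
                        Option.map pvBuildOrg (some (h0 :: t0))) line =
                      (recs.map pvBuildOrg, pvParseNoPubs line,
                       Option.map pvBuildOrg (some ((h0 :: t0) ++ [line]))) := by
                    simp only [pvStepACore, Option.map_some, hORG, hNP, Bool.false_eq_true,
                      if_false, eq_self_iff_true, if_true, pv_buildOrg_snoc]
                  have hG : pvGroupStep (recs, some (h0 :: t0)) line =
                      (recs, some ((h0 :: t0) ++ [line])) := by
                    unfold pvGroupStep; rw [hORG]; rfl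
                  rw [hA, hG, hN, ih _ _ _ (by intro c hc; simp at hc; subst hc; simp)]
          | false =>
              have hN : pvNPStep np line = np := by unfold pvNPStep; rw [hNP]; rfl
              cases cur with
              | none =>
                  have hA : pvStepACore (recs.map pvBuildOrg, np, Option.map pvBuildOrg none) line =
                      (recs.map pvBuildOrg, np, Option.map pvBuildOrg none) := by
                    unfold pvStepACore; rw [hORG, hNP]; rfl
                  have hG : pvGroupStep (recs, none) line = (recs, none) := by
                    unfold pvGroupStep; rw [hORG]; rfl
                  rw [hA, hG, hN, ih _ _ _ (by intro c hc; simp at hc)]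
              | some c =>
                  obtain ⟨h0, t0, rfl⟩ : ∃ h0 t0, c = h0 :: t0 := by
                    cases c with
                    | nil => exact absurd rfl (hcur _ rfl)
                    | cons a b => exact ⟨a, b, rfl⟩
                  have hA : pvStepACore (recs.map pvBuildOrg, np,
                        Option.map pvBuildOrg (some (h0 :: t0))) line =
                      (recs.map pvBuildOrg, np,
                       Option.map pvBuildOrg (some ((h0 :: t0) ++ [line]))) := by
                    simp only [pvStepACore, Option.map_some, hORG, hNP, Bool.false_eq_true,
                      if_false, pv_buildOrg_snoc, pv_chain_eq_tryKeys]
                  have hG : pvGroupStep (recs, some (h0 :: t0)) line =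
                      (recs, some ((h0 :: t0) ++ [line])) := by
                    unfold pvGroupStep; rw [hORG]; rfl
                  rw [hA, hG, hN, ih _ _ _ (by intro c hc; simp at hc; subst hc; simp)]

-- the grouping fold keeps the open record nonempty
lemma pv_group_ne_nil (ls : List String) : ∀ (recs : List (List String)) (cur : Option (List String)),
    (∀ c ∈ cur, c ≠ []) → ∀ c ∈ (ls.foldl pvGroupStep (recs, cur)).2, c ≠ [] := by
  induction ls with
  | nil => intro recs cur hcur; exact hcur
  | cons line ls ih =>
      intro recs cur hcur
      simp only [List.foldl_cons]
      cases hORG : PySem.Str.startswith line "ORG:" with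
      | true =>
          cases cur with
          | none =>
              rw [show pvGroupStep (recs, none) line = (recs, some [line]) from by
                unfold pvGroupStep; rw [hORG]; rfl]
              exact ih _ _ (by intro c hc; simp at hc; subst hc; simp)
          | some c =>
              rw [show pvGroupStep (recs, some c) line = (recs ++ [c], some [line]) from by
                unfold pvGroupStep; rw [hORG]; rfl]
              exact ih _ _ (by intro c hc; simp at hc; subst hc; simp)
      | false =>
          cases cur with
          | none =>
              rw [show pvGroupStep (recs, none) line = (recs, none) from by
                unfold pvGroupStep; rw [hORG]; rfl]
              exact ih _ _ (by intro c hc; simp at hc)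
          | some c =>
              rw [show pvGroupStep (recs, some c) line = (recs, some (c ++ [line])) from by
                unfold pvGroupStep; rw [hORG]; rfl]
              exact ih _ _ (by intro d hd; simp at hd; subst hd; cases c <;> simp)

-- ===== VERDICT (by name: the statement is the Claim_ definition above) =====
theorem parse_grantees_spec : Claim_equal_parse_grantees := by
  intro content _
  unfold Spec_parse_grantees parse_grantees parse_grantees_alt
  have hfold : (pvSplit content "\n").foldl pvStepA ([], [], none) =
      ((pvSplit content "\n").map PySem.Str.rstrip).foldl pvStepACore ([], [], none) := by
    rw [List.foldl_map]
    rfl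
  set ls := (pvSplit content "\n").map PySem.Str.rstrip with hls
  have hmain := pv_main ls [] none [] (by intro c hc; simp at hc)
  simp only [List.map_nil, Option.map_none] at hmain
  have hne := pv_group_ne_nil ls [] none (by intro c hc; simp at hc)
  simp only [hfold, hmain]
  cases hcur : (ls.foldl pvGroupStep ([], none)).2 with
  | none => simp
  | some c =>
      obtain ⟨h0, t0, rfl⟩ : ∃ h0 t0, c = h0 :: t0 := by
        have := hne c (by rw [hcur]; rfl)
        cases c with
        | nil => exact absurd rfl this
        | cons a b => exact ⟨a, b, rfl⟩
      simp [pv_buildOrg_items_ne_nil]
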